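-- pv_equiv track=rewrite | github.com/pypi-data/pypi-mirror-386 | packages/vgrid/vgrid-1.4.6-py3-none-any.whl/vgrid/utils/space_filling/morton.py | deinterleave_bits
-- ===== SOURCE A (Python) =====
-- def deinterleave_bits(n: int):
--     x = 0
--     y = 0
--     bit = 0
--     while n:
--         x |= (n & 1) << bit
--         n >>= 1
--         y |= (n & 1) << bit
--         n >>= 1
--         bit += 1
--     return x, y
-- ===== SOURCE B (Python) =====
-- def deinterleave_bits(n: int):
--     s = bin(n)[2:][::-1]          # binary digits, LSB first: s[i] is bit i
--     x = int(s[0::2][::-1] or '0', 2)   # even-position bits, back to MSB-first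
--     y = int(s[1::2][::-1] or '0', 2)   # odd-position bits
--     return x, y
-- ===== Notes on version B (the rewrite author's own statement) =====
-- stated objective: idiomatic
-- what changed: B builds the binary digit string once (bin(n)), reverses it so index = bit position, and extracts x and y by stride-2 slicing and base-2 parsing, replacing A's per-bit shift/or loop with a running bit counter.
-- outside the precondition, e.g. on deinterleave_bits(-1): A does not finish within the time limit, B raises ValueError
import Mathlib
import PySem

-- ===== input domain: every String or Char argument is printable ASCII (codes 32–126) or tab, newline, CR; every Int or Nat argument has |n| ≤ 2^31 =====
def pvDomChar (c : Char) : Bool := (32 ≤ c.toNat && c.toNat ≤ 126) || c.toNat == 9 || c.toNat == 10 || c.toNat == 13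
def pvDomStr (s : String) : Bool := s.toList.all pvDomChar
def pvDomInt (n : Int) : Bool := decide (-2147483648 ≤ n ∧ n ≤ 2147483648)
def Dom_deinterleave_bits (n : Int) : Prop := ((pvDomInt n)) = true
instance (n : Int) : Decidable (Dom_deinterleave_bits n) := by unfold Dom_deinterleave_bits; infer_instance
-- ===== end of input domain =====

-- B deinterleaves via the binary digit string (bin(n) reversed, stride-2 slices, int(_, 2))
-- instead of A's per-bit shift/or loop with a running bit counter; same cost, more idiomatic.

-- ===== PORT A =====
-- termination helper for the loop, cited by name in decreasing_by
theorem pvAShrink (n : Int) (h : ¬ n ≤ 0) : ((n >>> (1:Nat)) >>> (1:Nat)).toNat < n.toNat := by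
  obtain ⟨m, rfl⟩ : ∃ m : Nat, n = (m : Int) :=
    ⟨n.toNat, (Int.toNat_of_nonneg (by omega)).symm⟩
  have hm : ((m : Int) >>> (1:Nat)) >>> (1:Nat) = ((m >>> 1 >>> 1 : Nat) : Int) := rfl
  rw [hm]
  simp only [Int.toNat_natCast, Nat.shiftRight_succ, Nat.shiftRight_zero]
  omega

-- Python's `while n:` as structural recursion. Python never terminates on n < 0 (n >>= 1
-- stalls at -1), so the guard is `n ≤ 0` there; those inputs are outside Pre_.
-- `bit` stays ≥ 0 throughout, so `<<< bit.toNat` is exact for Python's `<< bit`.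
def pvALoop (n x y bit : Int) : Int × Int :=
  if h : n ≤ 0 then (x, y)
  else
    let x' := PySem.Int.bor x ((PySem.Int.band n 1) <<< bit.toNat)   -- x |= (n & 1) << bit
    let n1 := n >>> (1:Nat)                                          -- n >>= 1
    let y' := PySem.Int.bor y ((PySem.Int.band n1 1) <<< bit.toNat)  -- y |= (n & 1) << bit
    let n2 := n1 >>> (1:Nat)                                         -- n >>= 1
    pvALoop n2 x' y' (bit + 1)                                       -- bit += 1
termination_by n.toNat
decreasing_by exact pvAShrink n h

def deinterleave_bits (n : Int) : Int × Int := pvALoop n 0 0 0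

-- ===== PORT B =====
-- bin(n)[2:] for n ≥ 0, MSB first (hand port, exact there; bin(0)[2:] = "0" handled in _alt)
def pvBinGo (n : Nat) : List Char :=
  if h : n = 0 then [] else pvBinGo (n / 2) ++ [if n % 2 == 1 then '1' else '0']
termination_by n
decreasing_by omega

-- s[0::2] on a list of chars (hand port of stride-2 slicing, exact)
def pvEveryOther : List Char → List Char
  | [] => []
  | [a] => [a]
  | a :: _ :: t => a :: pvEveryOther t

-- int(s, 2) for a nonempty '0'/'1' string (hand port, exact there)
def pvParse2 (l : List Char) : Nat :=
  l.foldl (fun acc c => 2 * acc + (if c == '1' then 1 else 0)) 0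

-- `s or '0'`
def pvOr0 (l : List Char) : List Char := if l = [] then ['0'] else l

def deinterleave_bits_alt (n : Int) : Int × Int :=
  let s := (if n = 0 then ['0'] else pvBinGo n.toNat).reverse        -- bin(n)[2:][::-1]
  let x := pvParse2 (pvOr0 (pvEveryOther s).reverse)                 -- int(s[0::2][::-1] or '0', 2)
  let y := pvParse2 (pvOr0 (pvEveryOther (s.drop 1)).reverse)        -- int(s[1::2][::-1] or '0', 2)
  ((x : Int), (y : Int))

-- ===== PRECONDITION & SPEC =====
-- Python A never terminates on n < 0 (n >>= 1 stalls at -1), so only n ≥ 0 is claimed.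
def Pre_deinterleave_bits (n : Int) : Prop := 0 ≤ n
instance (n : Int) : Decidable (Pre_deinterleave_bits n) := by
  unfold Pre_deinterleave_bits; infer_instance

def pvWitness_deinterleave_bits : Int := 6

def Spec_deinterleave_bits (n : Int) (out : Int × Int) : Prop := out = deinterleave_bits_alt n
instance (n : Int) (out : Int × Int) : Decidable (Spec_deinterleave_bits n out) := by
  unfold Spec_deinterleave_bits; infer_instance

-- ===== CLAIM (what is proved, stated in full; the proofs are below) =====
def Claim_equal_deinterleave_bits : Prop :=
  ∀ (n : Int), Dom_deinterleave_bits n → Pre_deinterleave_bits n →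
    Spec_deinterleave_bits n (deinterleave_bits n)

-- ===== LEMMAS AND PROOFS =====

-- the mathematical deinterleave: value of the even-position bits of n
def pvDx (n : Nat) : Nat := if h : n = 0 then 0 else n % 2 + 2 * pvDx (n / 4)
termination_by n
decreasing_by omega

theorem pvDx_zero : pvDx 0 = 0 := by
  rw [pvDx]
  try simp

theorem pvDx_rec (m : Nat) : pvDx m = m % 2 + 2 * pvDx (m / 4) := by
  by_cases h : m = 0
  · subst h; norm_num [pvDx_zero]
  · rw [pvDx, dif_neg h]

theorem pvLorPow (k x : Nat) (hx : x < 2 ^ k) : x ||| 2 ^ k = x + 2 ^ k := by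
  apply Nat.eq_of_testBit_eq
  intro i
  rcases lt_trichotomy i k with hik | hik | hik
  · rw [Nat.testBit_lor, Nat.add_comm, Nat.testBit_two_pow_add_gt hik]
    have h4 : (2 ^ k).testBit i = false := by
      simp only [Nat.testBit_two_pow]; simp; omega
    simp [h4]
  · subst hik
    rw [Nat.testBit_lor, Nat.add_comm, Nat.testBit_two_pow_add_eq]
    have hxf : x.testBit i = false := Nat.testBit_eq_false_of_lt hx
    simp [hxf]
  · have h1 : x + 2 ^ k < 2 ^ i := by
      have h5 : 2 ^ (k + 1) ≤ 2 ^ i := Nat.pow_le_pow_right (by omega) (by omega)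
      have h6 := Nat.pow_succ 2 k
      omega
    have h2 : (x + 2 ^ k).testBit i = false := Nat.testBit_eq_false_of_lt h1
    have h3 : x.testBit i = false := Nat.testBit_eq_false_of_lt (by omega)
    have h4 : (2 ^ k).testBit i = false := by
      simp only [Nat.testBit_two_pow]; simp; omega
    simp [h2, h3, h4]

theorem pvLorBit (k x b : Nat) (hx : x < 2 ^ k) (hb : b ≤ 1) :
    x ||| (b <<< k) = x + b * 2 ^ k := by
  interval_cases b
  · simp [Nat.zero_shiftLeft]
  · rw [Nat.one_shiftLeft, pvLorPow k x hx]; ring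

theorem pvALoop_eq (n : Nat) : ∀ (x y bit : Nat), x < 2 ^ bit → y < 2 ^ bit →
    pvALoop (n : Int) (x : Int) (y : Int) (bit : Int) =
      (((x + 2 ^ bit * pvDx n : Nat) : Int), ((y + 2 ^ bit * pvDx (n / 2) : Nat) : Int)) := by
  induction n using Nat.strong_induction_on with
  | _ n ih =>
    intro x y bit hx hy
    by_cases h0 : n = 0
    · subst h0
      rw [pvALoop]
      try norm_num [pvDx_zero]
    · rw [pvALoop]
      have hng : ¬ ((n : Int) ≤ 0) := by omega
      rw [dif_neg hng]
      have ebit : ((bit : Int)).toNat = bit := Int.toNat_natCast bit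
      have e1 : PySem.Int.band ((n : Nat) : Int) 1 = ((n % 2 : Nat) : Int) := by
        rw [show (1 : Int) = ((1 : Nat) : Int) from rfl, PySem.Int.band_natCast,
          Nat.and_one_is_mod]
      have hn1 : (((n : Nat) : Int) >>> (1 : Nat)) = ((n / 2 : Nat) : Int) := by
        rw [show (((n : Nat) : Int) >>> (1 : Nat)) = ((n >>> 1 : Nat) : Int) from rfl,
          Nat.shiftRight_eq_div_pow]
        try norm_num
      have e1' : PySem.Int.band ((n / 2 : Nat) : Int) 1 = (((n / 2) % 2 : Nat) : Int) := by
        rw [show (1 : Int) = ((1 : Nat) : Int) from rfl, PySem.Int.band_natCast,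
          Nat.and_one_is_mod]
      have hn2 : (((n / 2 : Nat) : Int) >>> (1 : Nat)) = ((n / 4 : Nat) : Int) := by
        rw [show (((n / 2 : Nat) : Int) >>> (1 : Nat)) = (((n / 2) >>> 1 : Nat) : Int) from rfl,
          Nat.shiftRight_eq_div_pow]
        try norm_num [Nat.div_div_eq_div_mul]
      have esh : ∀ m : Nat, ((m : Nat) : Int) <<< bit = ((m <<< bit : Nat) : Int) :=
        fun m => rfl
      have ex : PySem.Int.bor ((x : Nat) : Int) (((n % 2) <<< bit : Nat) : Int) =
          ((x + n % 2 * 2 ^ bit : Nat) : Int) := by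
        rw [PySem.Int.bor_natCast, pvLorBit bit x (n % 2) hx (by omega)]
      have ey : PySem.Int.bor ((y : Nat) : Int) ((((n / 2) % 2) <<< bit : Nat) : Int) =
          ((y + (n / 2) % 2 * 2 ^ bit : Nat) : Int) := by
        rw [PySem.Int.bor_natCast, pvLorBit bit y ((n / 2) % 2) hy (by omega)]
      have ebp : (((bit : Nat) : Int) + 1) = ((bit + 1 : Nat) : Int) := by push_cast; ring
      simp only [ebit, e1, esh, ex, hn1, e1', ey, hn2, ebp]
      have hb2 : (2 : Nat) ^ (bit + 1) = 2 * 2 ^ bit := by rw [Nat.pow_succ]; ring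
      have hx' : x + n % 2 * 2 ^ bit < 2 ^ (bit + 1) := by
        rcases Nat.mod_two_eq_zero_or_one n with h9 | h9 <;>
          rw [h9, Nat.pow_succ] <;> simp <;> omega
      have hy' : y + (n / 2) % 2 * 2 ^ bit < 2 ^ (bit + 1) := by
        rcases Nat.mod_two_eq_zero_or_one (n / 2) with h9 | h9 <;>
          rw [h9, Nat.pow_succ] <;> simp <;> omega
      rw [ih (n / 4) (by omega) _ _ _ hx' hy']
      have h42 : n / 4 / 2 = n / 2 / 4 := by omega
      rw [h42]
      have c1 : x + n % 2 * 2 ^ bit + 2 ^ (bit + 1) * pvDx (n / 4) =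
          x + 2 ^ bit * (n % 2 + 2 * pvDx (n / 4)) := by rw [hb2]; ring
      have c2 : y + (n / 2) % 2 * 2 ^ bit + 2 ^ (bit + 1) * pvDx (n / 2 / 4) =
          y + 2 ^ bit * ((n / 2) % 2 + 2 * pvDx (n / 2 / 4)) := by rw [hb2]; ring
      rw [c1, c2, ← pvDx_rec n, ← pvDx_rec (n / 2)]

theorem deinterleave_bits_eq (n : Nat) :
    deinterleave_bits (n : Int) = (((pvDx n : Nat) : Int), ((pvDx (n / 2) : Nat) : Int)) := by
  have h := pvALoop_eq n 0 0 0 (by norm_num) (by norm_num)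
  simpa [deinterleave_bits] using h

-- B side: the LSB-first digit list (reverse of pvBinGo)
def pvBitsL (n : Nat) : List Char :=
  if h : n = 0 then [] else (if n % 2 == 1 then '1' else '0') :: pvBitsL (n / 2)
termination_by n
decreasing_by omega

theorem pvBinGo_reverse (n : Nat) : (pvBinGo n).reverse = pvBitsL n := by
  induction n using Nat.strong_induction_on with
  | _ n ih =>
    rw [pvBinGo, pvBitsL]
    by_cases h : n = 0
    · simp [h]
    · rw [dif_neg h, dif_neg h]
      simp [List.reverse_append, ih (n / 2) (by omega)]

theorem pvParse2_reverse_cons (c : Char) (l : List Char) :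
    pvParse2 (c :: l).reverse = (if c == '1' then 1 else 0) + 2 * pvParse2 l.reverse := by
  simp only [pvParse2, List.reverse_cons, List.foldl_append, List.foldl_cons, List.foldl_nil]
  omega

theorem pvW_eq (l : List Char) : pvParse2 (pvOr0 l.reverse) = pvParse2 l.reverse := by
  by_cases h : l = []
  · simp [h, pvOr0, pvParse2]
  · have hne : l.reverse ≠ [] := by simpa using h
    simp [pvOr0, hne]

theorem pvEven_val (n : Nat) :
    pvParse2 (pvEveryOther (pvBitsL n)).reverse = pvDx n := by
  induction n using Nat.strong_induction_on with
  | _ n ih =>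
    by_cases h0 : n = 0
    · subst h0
      have hb0 : pvBitsL 0 = [] := by rw [pvBitsL]; try simp
      rw [hb0]
      norm_num [pvEveryOther, pvParse2, pvDx_zero]
    · by_cases h1 : n / 2 = 0
      · have hn : n = 1 := by omega
        subst hn
        have hb0 : pvBitsL 0 = [] := by rw [pvBitsL]; try simp
        have hb1 : pvBitsL 1 = ['1'] := by rw [pvBitsL]; norm_num [hb0]
        have hd1 : pvDx 1 = 1 := by rw [pvDx_rec 1]; norm_num [pvDx_zero]
        rw [hb1]
        norm_num [pvEveryOther, pvParse2, hd1]
      · rw [pvBitsL, dif_neg h0]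
        rw [pvBitsL, dif_neg h1]
        simp only [pvEveryOther]
        rw [pvParse2_reverse_cons]
        have hq : n / 2 / 2 = n / 4 := by omega
        rw [hq, ih (n / 4) (by omega), pvDx_rec n]
        have hm : (if ((if ((n % 2 == 1) = true) then '1' else '0') == '1') = true
            then 1 else 0) = n % 2 := by
          rcases Nat.mod_two_eq_zero_or_one n with h | h <;> simp [h]
        rw [hm]

theorem deinterleave_bits_alt_eq (n : Nat) :
    deinterleave_bits_alt (n : Int) =
      (((pvDx n : Nat) : Int), ((pvDx (n / 2) : Nat) : Int)) := by
  by_cases h0 : n = 0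
  · subst h0
    norm_num [deinterleave_bits_alt, pvEveryOther, pvOr0, pvParse2, pvDx_zero]
  · have hne : ((n : Nat) : Int) ≠ 0 := by exact_mod_cast h0
    rw [deinterleave_bits_alt]
    simp only [if_neg hne, Int.toNat_natCast, pvBinGo_reverse]
    have hd : (pvBitsL n).drop 1 = pvBitsL (n / 2) := by
      rw [pvBitsL, dif_neg h0]
      try simp
    rw [hd, pvW_eq, pvW_eq, pvEven_val, pvEven_val]

-- ===== VERDICT (by name: the statement is the Claim_ definition above) =====
theorem deinterleave_bits_spec : Claim_equal_deinterleave_bits := by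
  intro n _ hpre
  unfold Spec_deinterleave_bits
  obtain ⟨m, rfl⟩ : ∃ m : Nat, n = (m : Int) :=
    ⟨n.toNat, (Int.toNat_of_nonneg hpre).symm⟩
  rw [deinterleave_bits_eq, deinterleave_bits_alt_eq]
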